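-- pv_equiv track=rewrite | github.com/preritshetty/LLM_powered_analysis | cleaner/phase3/code_executor.py | _describe_flag_status
-- ===== SOURCE A (Python) =====
-- def _describe_flag_status(flag_status: int) -> str:
--     """Convert flag status to human-readable description"""
--     if flag_status == 0:
--         return "No flags"
--
--     flags = []
--     power = 1
--     temp_status = flag_status
--
--     while temp_status > 0:
--         if temp_status & 1:
--             flags.append(str(power))
--         temp_status >>= 1
--         power <<= 1
--
--     return f"Flags: {'+'.join(flags)}"
-- ===== SOURCE B (Python) =====
-- def _describe_flag_status(flag_status: int) -> str:
--     """Convert flag status to human-readable description"""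
--     if flag_status == 0:
--         return "No flags"
--
--     flags = []
--     temp_status = flag_status
--
--     # Kernighan walk: visit only the set bits, lowest first; no power counter.
--     while temp_status > 0:
--         rest = temp_status & (temp_status - 1)   # lowest set bit cleared
--         flags.append(str(temp_status - rest))    # the lowest set bit itself
--         temp_status = rest
--
--     return f"Flags: {'+'.join(flags)}"
-- ===== Notes on version B (the rewrite author's own statement) =====
-- stated objective: idiomatic
-- what changed: Replaces the shift-every-bit loop with its power counter by Brian Kernighan's clear-lowest-set-bit walk (rest = n & (n-1)), which iterates once per SET bit and keeps no power variable.
import Mathlib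
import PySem

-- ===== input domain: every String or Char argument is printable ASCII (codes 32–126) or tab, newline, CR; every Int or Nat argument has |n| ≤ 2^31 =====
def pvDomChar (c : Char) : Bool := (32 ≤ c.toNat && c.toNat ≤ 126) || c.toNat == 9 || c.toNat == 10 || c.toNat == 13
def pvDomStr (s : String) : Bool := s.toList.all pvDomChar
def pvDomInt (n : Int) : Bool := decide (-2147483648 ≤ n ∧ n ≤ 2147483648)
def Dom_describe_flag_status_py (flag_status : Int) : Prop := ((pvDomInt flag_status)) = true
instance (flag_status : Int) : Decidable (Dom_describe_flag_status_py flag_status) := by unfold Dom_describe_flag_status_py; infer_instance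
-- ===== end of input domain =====

-- B replaces A's shift-and-power loop by Brian Kernighan's clear-lowest-set-bit walk
-- (one iteration per set bit, no power counter): a more idiomatic bit-flag enumeration.


-- ===== PORT A =====
-- termination helper for A's loop: `temp >>= 1` shrinks a positive temp
theorem pv_natCast_shiftRight_one (m : Nat) : (m : Int) >>> (1 : Nat) = ((m / 2 : Nat) : Int) := by
  rw [show ((m : Int) >>> (1 : Nat)) = ((m >>> 1 : Nat) : Int) from (Int.natCast_shiftRight m 1).symm, Nat.shiftRight_one]

theorem pv_shiftRight_toNat_lt (t : Int) (h : 0 < t) : (t >>> (1 : Nat)).toNat < t.toNat := by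
  obtain ⟨m, rfl⟩ := Int.eq_ofNat_of_zero_le h.le
  have hm : 0 < m := by exact_mod_cast h
  rw [pv_natCast_shiftRight_one]
  simpa using Nat.div_lt_self hm one_lt_two

-- while temp_status > 0: if temp_status & 1: flags.append(str(power)); temp_status >>= 1; power <<= 1
def pvLoopA (temp power : Int) (flags : List String) : List String :=
  if h : 0 < temp then
    pvLoopA (temp >>> (1 : Nat)) (power <<< (1 : Nat))
      (if PySem.Int.band temp 1 ≠ 0 then flags ++ [PySem.Int.toStr power] else flags)
  else flags
termination_by temp.toNat
decreasing_by exact pv_shiftRight_toNat_lt temp h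

def describe_flag_status_py (flag_status : Int) : String :=
  if flag_status = 0 then "No flags"
  else "Flags: " ++ PySem.Str.join "+" (pvLoopA flag_status 1 [])

-- ===== PORT B =====
-- termination helper for B's loop: clearing the lowest set bit shrinks a positive temp
theorem pv_band_pred_toNat_lt (t : Int) (h : 0 < t) :
    (PySem.Int.band t (t - 1)).toNat < t.toNat := by
  rw [PySem.Int.band_of_nonneg h.le (by omega)]
  have h1 : (t - 1).toNat = t.toNat - 1 := by omega
  have h2 : t.toNat &&& (t - 1).toNat ≤ t.toNat - 1 := h1 ▸ Nat.and_le_right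
  have ht : 0 < t.toNat := by omega
  rw [Int.toNat_natCast]
  omega

-- while temp_status > 0: rest = temp_status & (temp_status - 1); flags.append(str(temp_status - rest)); temp_status = rest
def pvLoopB (temp : Int) (flags : List String) : List String :=
  if h : 0 < temp then
    pvLoopB (PySem.Int.band temp (temp - 1))
      (flags ++ [PySem.Int.toStr (temp - PySem.Int.band temp (temp - 1))])
  else flags
termination_by temp.toNat
decreasing_by exact pv_band_pred_toNat_lt temp h

def describe_flag_status_py_alt (flag_status : Int) : String :=
  if flag_status = 0 then "No flags"
  else "Flags: " ++ PySem.Str.join "+" (pvLoopB flag_status [])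

-- ===== PRECONDITION & SPEC =====
def Spec_describe_flag_status_py (flag_status : Int) (out : String) : Prop := out = describe_flag_status_py_alt flag_status
instance (flag_status : Int) (out : String) : Decidable (Spec_describe_flag_status_py flag_status out) := by unfold Spec_describe_flag_status_py; infer_instance

-- ===== CLAIM (what is proved, stated in full; the proofs are below) =====
def Claim_equal_describe_flag_status_py : Prop := ∀ (flag_status : Int), Dom_describe_flag_status_py flag_status → Spec_describe_flag_status_py flag_status (describe_flag_status_py flag_status)

-- ===== LEMMAS AND PROOFS =====

-- the lowest set bit of n (as a value: a power of two), 0 for n = 0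
def pvLsb (n : Nat) : Nat :=
  if h : n = 0 then 0
  else if n % 2 = 1 then 1
  else 2 * pvLsb (n / 2)
termination_by n
decreasing_by exact Nat.div_lt_self (Nat.pos_of_ne_zero h) one_lt_two

theorem pvLsb_le (n : Nat) : pvLsb n ≤ n := by
  induction n using Nat.strong_induction_on with
  | _ n ih =>
    rw [pvLsb]
    split
    · omega
    · split
      · omega
      · have h0 : n ≠ 0 := by assumption
        have := ih (n / 2) (Nat.div_lt_self (Nat.pos_of_ne_zero h0) one_lt_two)
        omega

theorem pvLsb_pos (n : Nat) (h : 0 < n) : 0 < pvLsb n := by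
  induction n using Nat.strong_induction_on with
  | _ n ih =>
    rw [pvLsb]
    split
    · omega
    · split
      · omega
      · have h0 : n ≠ 0 := by assumption
        have h2 : ¬ n % 2 = 1 := by assumption
        have := ih (n / 2) (Nat.div_lt_self (Nat.pos_of_ne_zero h0) one_lt_two) (by omega)
        omega

-- Kernighan's identity: n & (n-1) clears the lowest set bit
theorem pv_land_pred (n : Nat) (h : 0 < n) : n &&& (n - 1) = n - pvLsb n := by
  induction n using Nat.strong_induction_on with
  | _ n ih =>
    rcases Nat.even_or_odd n with he | ho
    · -- n = 2k, k > 0 : (2k) &&& (2k-1) = 2*(k &&& (k-1))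
      obtain ⟨k, hk⟩ := he
      have hkpos : 0 < k := by omega
      have key : n &&& (n - 1) = Nat.bit false k &&& Nat.bit true (k - 1) := by
        rw [show Nat.bit false k = n from by simp [Nat.bit]; omega,
            show Nat.bit true (k - 1) = n - 1 from by simp [Nat.bit]; omega]
      rw [Nat.land_bit] at key
      have ihk := ih k (by omega) hkpos
      rw [ihk] at key
      simp [Nat.bit] at key
      have hlsb : pvLsb n = 2 * pvLsb k := by
        rw [pvLsb]
        have h1 : ¬ n = 0 := by omega
        have h2 : ¬ n % 2 = 1 := by omega
        have h3 : n / 2 = k := by omega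
        simp [h1, h2, h3]
      have hle := pvLsb_le k
      have hp := pvLsb_pos k hkpos
      rw [key, hlsb]
      omega
    · -- n odd : n &&& (n-1) = n - 1, lowest bit is 1
      obtain ⟨k, hk⟩ := ho
      have key : n &&& (n - 1) = Nat.bit true k &&& Nat.bit false k := by
        rw [show Nat.bit true k = n from by simp [Nat.bit]; omega,
            show Nat.bit false k = n - 1 from by simp [Nat.bit]; omega]
      rw [Nat.land_bit, Nat.and_self] at key
      simp [Nat.bit] at key
      have hlsb : pvLsb n = 1 := by
        rw [pvLsb]
        have h1 : ¬ n = 0 := by omega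
        have h2 : n % 2 = 1 := by omega
        simp [h1, h2]
      rw [key, hlsb]
      omega

-- the list of flag strings A's loop produces from (n, power), A's recursion verbatim
def pvFlagsOf (n : Nat) (p : Int) : List String :=
  if h : n = 0 then []
  else (if n % 2 = 1 then [PySem.Int.toStr p] else []) ++ pvFlagsOf (n / 2) (p <<< (1 : Nat))
termination_by n
decreasing_by exact Nat.div_lt_self (Nat.pos_of_ne_zero h) one_lt_two

theorem pvFlagsOf_double (k : Nat) (p : Int) : pvFlagsOf (2 * k) p = pvFlagsOf k (p <<< (1 : Nat)) := by
  rcases Nat.eq_zero_or_pos k with rfl | hk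
  · rw [pvFlagsOf, pvFlagsOf]; simp
  · rw [pvFlagsOf]
    have h1 : ¬ 2 * k = 0 := by omega
    have h2 : ¬ (2 * k) % 2 = 1 := by omega
    have h3 : 2 * k / 2 = k := by omega
    simp [h1, h3]

-- peeling the lowest set bit off pvFlagsOf
theorem pvFlagsOf_lsb (n : Nat) (p : Int) (h : 0 < n) :
    pvFlagsOf n p = PySem.Int.toStr (p * (pvLsb n : Int)) :: pvFlagsOf (n - pvLsb n) p := by
  induction n using Nat.strong_induction_on generalizing p with
  | _ n ih =>
    rcases Nat.even_or_odd n with he | ho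
    · obtain ⟨k, hk⟩ := he
      have hkpos : 0 < k := by omega
      have hkn : n = 2 * k := by omega
      have hlsb : pvLsb n = 2 * pvLsb k := by
        rw [pvLsb]
        have h1 : ¬ n = 0 := by omega
        have h2 : ¬ n % 2 = 1 := by omega
        have h3 : n / 2 = k := by omega
        simp [h1, h2, h3]
      have hle := pvLsb_le k
      have e1 : (p <<< (1 : Nat)) * (pvLsb k : Int) = p * (pvLsb n : Int) := by
        have hsl : p <<< (1 : Nat) = 2 * p := by
          rw [Int.shiftLeft_eq]; ring
        rw [hsl, hlsb]
        push_cast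
        ring
      have e2 : n - pvLsb n = 2 * (k - pvLsb k) := by omega
      rw [hkn, pvFlagsOf_double, ih k (by omega) (p <<< (1 : Nat)) hkpos, ← hkn, e1, e2,
          pvFlagsOf_double]
    · obtain ⟨k, hk⟩ := ho
      have hlsb : pvLsb n = 1 := by
        rw [pvLsb]
        have h1 : ¬ n = 0 := by omega
        have h2 : n % 2 = 1 := by omega
        simp [h1, h2]
      rw [pvFlagsOf]
      have h1 : ¬ n = 0 := by omega
      have h2 : n % 2 = 1 := by omega
      have h3 : n / 2 = k := by omega
      have h4 : n - 1 = 2 * k := by omega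
      rw [dif_neg h1, if_pos h2, h3, hlsb, h4, pvFlagsOf_double]
      simp

-- A's loop computes pvFlagsOf
theorem pvLoopA_eq (n : Nat) (p : Int) (acc : List String) :
    pvLoopA (n : Int) p acc = acc ++ pvFlagsOf n p := by
  induction n using Nat.strong_induction_on generalizing p acc with
  | _ n ih =>
    rcases Nat.eq_zero_or_pos n with rfl | hn
    · rw [pvLoopA, pvFlagsOf]; simp
    · rw [pvLoopA, pvFlagsOf]
      have h0 : (0 : Int) < (n : Int) := by exact_mod_cast hn
      have hband : PySem.Int.band (n : Int) 1 = ((n &&& 1 : Nat) : Int) :=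
        (PySem.Int.band_natCast n 1).symm
      have hmod : n &&& 1 = n % 2 := Nat.and_one_is_mod n
      rw [dif_pos h0, pv_natCast_shiftRight_one, ih (n / 2) (Nat.div_lt_self hn one_lt_two)]
      have h1 : ¬ n = 0 := by omega
      rw [dif_neg h1, hband, hmod]
      by_cases h2 : n % 2 = 1
      · rw [if_pos h2, h2, if_pos (by decide), List.append_assoc]
      · have h2' : n % 2 = 0 := by omega
        rw [if_neg h2, h2']
        simp

-- B's loop computes pvFlagsOf with power 1
theorem pvLoopB_eq (n : Nat) (acc : List String) :
    pvLoopB (n : Int) acc = acc ++ pvFlagsOf n 1 := by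
  induction n using Nat.strong_induction_on generalizing acc with
  | _ n ih =>
    rcases Nat.eq_zero_or_pos n with rfl | hn
    · rw [pvLoopB, pvFlagsOf]; simp
    · rw [pvLoopB]
      have h0 : (0 : Int) < (n : Int) := by exact_mod_cast hn
      have hle := pvLsb_le n
      have hpos := pvLsb_pos n hn
      have hpred : ((n : Int) - 1) = ((n - 1 : Nat) : Int) := by omega
      have hband : PySem.Int.band (n : Int) ((n : Int) - 1) = ((n - pvLsb n : Nat) : Int) := by
        rw [hpred, ← pv_land_pred n hn]
        exact (PySem.Int.band_natCast n (n - 1)).symm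
      rw [dif_pos h0, hband, ih (n - pvLsb n) (by omega)]
      have hdiff : (n : Int) - ((n - pvLsb n : Nat) : Int) = ((pvLsb n : Nat) : Int) := by
        push_cast [Nat.cast_sub hle]; ring
      rw [hdiff, pvFlagsOf_lsb n 1 hn]
      simp

-- ===== VERDICT (by name: the statement is the Claim_ definition above) =====
theorem describe_flag_status_py_spec : Claim_equal_describe_flag_status_py := by
  intro flag_status _
  unfold Spec_describe_flag_status_py describe_flag_status_py describe_flag_status_py_alt
  by_cases h0 : flag_status = 0
  · simp [h0]
  · rw [if_neg h0, if_neg h0]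
    rcases lt_or_gt_of_ne h0 with hneg | hpos
    · -- negative input: neither loop runs, both produce the empty flag list
      rw [pvLoopA, pvLoopB, dif_neg (by omega), dif_neg (by omega)]
    · obtain ⟨m, rfl⟩ := Int.eq_ofNat_of_zero_le hpos.le
      rw [pvLoopA_eq, pvLoopB_eq]
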